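-- pv_equiv track=rewrite | github.com/Darty1/course-python | flag.py | flag
-- ===== SOURCE A (Python) =====
-- from _ctypes import ArgumentError
--
-- def flag(n):
--     if n % 2 != 0:
--         raise ArgumentError('The input N shall be an integer even number')
--     st = '#' * (3 * n + 2) + '\n'
--     for i in range(0, n // 2):
--         st += '#' + 3 * n * ' ' + '#\n'
--     k = n // 2 - 1
--     s = 0
--     for i in range(0, n):
--         st += '#' + (n + k) * ' ' + '*' + s * 'o' + '*' + (n + k) * ' ' + '#\n'
--         if k > 0 and i <= n // 2 - 1:
--             k -= 1
--             s += 2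
--         elif i > n // 2 - 1:
--             k += 1
--             s -= 2
--     for i in range(0, n // 2):
--         st += '#' + 3 * n * ' ' + '#\n'
--
--     st += '#' * (3 * n + 2) + '\n'
--     return st
-- ===== SOURCE B (Python) =====
-- def flag(n):
--     if n % 2 != 0:
--         raise ValueError('The input N shall be an integer even number')
--     border = '#' * (3 * n + 2) + '\n'
--     blanks = ('#' + 3 * n * ' ' + '#\n') * (n // 2)
--     half = n // 2
--     middle = ''.join(
--         '#' + (n + half - 1 - m) * ' ' + '*' + 2 * m * 'o' + '*' + (n + half - 1 - m) * ' ' + '#\n'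
--         for m in (min(i, n - 1 - i) for i in range(n))
--     )
--     return border + blanks + middle + blanks + border
-- ===== Notes on version B (the rewrite author's own statement) =====
-- stated objective: simpler
-- what changed: Replaces A's middle loop that threads mutable k/s accumulators through guarded branches with a closed-form per-row formula (the row's distance from the nearer border determines its padding and o-count directly), and replaces the two blank-row loops with string multiplication.
import Mathlib
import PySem

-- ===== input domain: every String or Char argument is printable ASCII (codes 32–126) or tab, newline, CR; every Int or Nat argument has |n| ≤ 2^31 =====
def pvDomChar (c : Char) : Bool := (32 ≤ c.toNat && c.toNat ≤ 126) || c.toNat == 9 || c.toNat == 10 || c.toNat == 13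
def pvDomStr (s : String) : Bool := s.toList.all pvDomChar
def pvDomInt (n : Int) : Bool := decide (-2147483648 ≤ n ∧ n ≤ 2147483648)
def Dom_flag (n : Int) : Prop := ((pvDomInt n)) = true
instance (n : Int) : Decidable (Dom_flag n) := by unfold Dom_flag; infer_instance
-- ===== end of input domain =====

-- B replaces A's k/s accumulator loop by a closed-form per-row formula and the
-- blank-row loops by string multiplication (objective: simpler).

-- ===== PORT A =====
-- Python 'c' * k on a string: exact (negative k gives the empty string)
def flagRep (c : Char) (k : Int) : List Char := List.replicate k.toNat c

-- the blank row '#' + 3*n*' ' + '#\n' (appears verbatim in both Pythons)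
def flagBlank (n : Int) : List Char := ['#'] ++ flagRep ' ' (3 * n) ++ ['#', '\n']

-- the body of A's middle loop: append the row, then update (k, s) by A's branches
def flagStep (n : Int) (acc : List Char × Int × Int) (i : Int) : List Char × Int × Int :=
  let st := acc.1 ++ ['#'] ++ flagRep ' ' (n + acc.2.1) ++ ['*'] ++ flagRep 'o' acc.2.2
              ++ ['*'] ++ flagRep ' ' (n + acc.2.1) ++ ['#', '\n']
  if acc.2.1 > 0 ∧ i ≤ PySem.Int.floordiv n 2 - 1 then (st, acc.2.1 - 1, acc.2.2 + 2)
  else if i > PySem.Int.floordiv n 2 - 1 then (st, acc.2.1 + 1, acc.2.2 - 2)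
  else (st, acc.2.1, acc.2.2)

def flag (n : Int) : String :=
  if PySem.Int.mod n 2 ≠ 0 then "" -- Python raises ArgumentError here; excluded by Pre_flag
  else
    let st := flagRep '#' (3 * n + 2) ++ ['\n']
    let st := (PySem.List.pyRange 0 (PySem.Int.floordiv n 2) 1).foldl
                (fun st _ => st ++ flagBlank n) st
    let st := ((PySem.List.pyRange 0 n 1).foldl (flagStep n)
                (st, PySem.Int.floordiv n 2 - 1, 0)).1
    let st := (PySem.List.pyRange 0 (PySem.Int.floordiv n 2) 1).foldl
                (fun st _ => st ++ flagBlank n) st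
    String.ofList (st ++ flagRep '#' (3 * n + 2) ++ ['\n'])

-- ===== PORT B =====
-- row of B's middle comprehension: padding and o-count computed from m = min(i, n-1-i)
def flagRowB (n : Int) (i : Int) : List Char :=
  let m := min i (n - 1 - i)
  ['#'] ++ flagRep ' ' (n + PySem.Int.floordiv n 2 - 1 - m) ++ ['*'] ++ flagRep 'o' (2 * m)
    ++ ['*'] ++ flagRep ' ' (n + PySem.Int.floordiv n 2 - 1 - m) ++ ['#', '\n']

def flag_alt (n : Int) : String :=
  if PySem.Int.mod n 2 ≠ 0 then "" -- Python B raises ValueError here; excluded by Pre_flag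
  else
    let border := flagRep '#' (3 * n + 2) ++ ['\n']
    let blanks := (List.replicate (PySem.Int.floordiv n 2).toNat (flagBlank n)).flatten
    let middle := ((PySem.List.pyRange 0 n 1).map (flagRowB n)).flatten
    String.ofList (border ++ blanks ++ middle ++ blanks ++ border)

-- ===== PRECONDITION & SPEC =====
-- A raises ArgumentError (and B ValueError) on every odd n; exactly those inputs are excluded.
def Pre_flag (n : Int) : Prop := PySem.Int.mod n 2 = 0
instance (n : Int) : Decidable (Pre_flag n) := by unfold Pre_flag; infer_instance
def pvWitness_flag : Int := 4

def Spec_flag (n : Int) (out : String) : Prop := out = flag_alt n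
instance (n : Int) (out : String) : Decidable (Spec_flag n out) := by unfold Spec_flag; infer_instance

-- ===== CLAIM (what is proved, stated in full; the proofs are below) =====
def Claim_equal_flag : Prop := ∀ (n : Int), Dom_flag n → Pre_flag n → Spec_flag n (flag n)

-- ===== LEMMAS AND PROOFS =====

-- A's blank-row loop appends a constant row once per iteration
theorem foldl_const_append {α : Type} (c : List Char) (l : List α) (st : List Char) :
    l.foldl (fun st _ => st ++ c) st = st ++ (List.replicate l.length c).flatten := by
  induction l generalizing st with
  | nil => simp
  | cons a l ih => simp [List.foldl, ih, List.replicate_succ]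

theorem fd2 (t : Int) : PySem.Int.floordiv (2 * t) 2 = t := by
  have h := PySem.Int.floordiv_eq_iff_of_pos (a := 2 * t) (b := 2) (q := t) (by norm_num)
  exact h.mpr (by constructor <;> omega)

-- one iteration of A's loop from the closed-form state yields B's row and the next closed-form state
theorem flag_step_closed (t j : Int) (st : List Char) :
    flagStep (2 * t) (st, t - 1 - min j (2 * t - 1 - j), 2 * min j (2 * t - 1 - j)) j
      = (st ++ flagRowB (2 * t) j,
         t - 1 - min (j + 1) (2 * t - 1 - (j + 1)), 2 * min (j + 1) (2 * t - 1 - (j + 1))) := by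
  have h2 : 2 * t + (t - 1 - min j (2 * t - 1 - j)) = 2 * t + t - 1 - min j (2 * t - 1 - j) := by
    omega
  simp only [flagStep, flagRowB, fd2]
  rcases lt_trichotomy j (t - 1) with hc | hc | hc
  · rw [if_pos ⟨by omega, by omega⟩]
    exact Prod.ext (by simp [List.append_assoc, h2]) (Prod.ext (by simp; omega) (by simp; omega))
  · rw [if_neg (by omega), if_neg (by omega)]
    exact Prod.ext (by simp [List.append_assoc, h2]) (Prod.ext (by simp; omega) (by simp; omega))
  · rw [if_neg (by omega), if_pos (by omega)]
    exact Prod.ext (by simp [List.append_assoc, h2]) (Prod.ext (by simp; omega) (by simp; omega))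

-- A's middle fold from the closed-form state produces B's closed-form rows
theorem mid_fold (t : Int) (j : Int) (st : List Char) (h0 : 0 ≤ j) (hj : j ≤ 2 * t) :
    ((PySem.List.pyRange j (2 * t) 1).foldl (flagStep (2 * t))
        (st, t - 1 - min j (2 * t - 1 - j), 2 * min j (2 * t - 1 - j))).1
      = st ++ ((PySem.List.pyRange j (2 * t) 1).map (flagRowB (2 * t))).flatten := by
  by_cases hlt : j < 2 * t
  · rw [PySem.List.pyRange_one_cons hlt]
    have hrec := mid_fold t (j + 1) (st ++ flagRowB (2 * t) j) (by omega) (by omega)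
    simp only [List.foldl_cons, flag_step_closed t j st, hrec, List.map_cons,
      List.flatten_cons, List.append_assoc]
  · have hr : PySem.List.pyRange j (2 * t) 1 = [] := by
      rw [PySem.List.pyRange_one]
      have : (2 * t - j).toNat = 0 := by omega
      simp [this]
    simp [hr]
termination_by (2 * t - j).toNat
decreasing_by omega

-- ===== VERDICT (by name: the statement is the Claim_ definition above) =====
theorem flag_spec : Claim_equal_flag := by
  intro n _ hpre
  obtain ⟨t, ht⟩ : ∃ t, n = 2 * t := by
    have := PySem.Int.floordiv_mul_add_mod n 2
    exact ⟨PySem.Int.floordiv n 2, by rw [Pre_flag] at hpre; omega⟩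
  subst ht
  have hmod : ¬ PySem.Int.mod (2 * t) 2 ≠ 0 := by simp [Pre_flag] at hpre; simp [hpre]
  by_cases hnn : 1 ≤ t
  · have hmid := mid_fold t 0
      (flagRep '#' (3 * (2 * t) + 2) ++ ['\n'] ++
        (List.replicate t.toNat (flagBlank (2 * t))).flatten) le_rfl (by omega)
    have hmin0 : min (0 : Int) (2 * t - 1 - 0) = 0 := by omega
    rw [hmin0] at hmid
    norm_num at hmid
    simp only [Spec_flag, flag, flag_alt, if_neg hmod, fd2, foldl_const_append,
      PySem.List.length_pyRange_one, Int.sub_zero, List.append_assoc] at hmid ⊢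
    simp only [List.cons_append, List.nil_append] at hmid ⊢
    rw [hmid]
    simp [List.append_assoc]
  · have hr0 : PySem.List.pyRange 0 (2 * t) 1 = [] := by
      rw [PySem.List.pyRange_one]
      simp
      omega
    have hrt : PySem.List.pyRange 0 t 1 = [] := by
      rw [PySem.List.pyRange_one]
      simp
      omega
    have htn : t.toNat = 0 := by omega
    simp [Spec_flag, flag, flag_alt, hmod, hr0, hrt, htn]
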